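-- pv_equiv track=rewrite | github.com/Maytide/Miscellaneous | Karger Min Cut/KargerMinCut.py | merge_graphs
-- ===== SOURCE A (Python) =====
-- def merge_graphs(e1, e2):
--     # enumerated_edge_list, _, node_counter = node_map(e1 + e2)
--     node_counter = 0
--     enumerated_edge_list = [] # List of edges, with nodes mapped from zero -> num_nodes-1
--     enumeration_map_fwd = {}
--     for a, b in e1:
--         if a not in enumeration_map_fwd:
--             enumeration_map_fwd[a] = node_counter
--             node_counter += 1
--
--         if b not in enumeration_map_fwd:
--             enumeration_map_fwd[b] = node_counter
--             node_counter += 1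
--
--         enumerated_edge_list.append((enumeration_map_fwd[a], enumeration_map_fwd[b]))
--
--     # Don't reset node counter
--     enumeration_map_fwd = {}
--     for a, b in e2:
--         if a not in enumeration_map_fwd:
--             enumeration_map_fwd[a] = node_counter
--             node_counter += 1
--
--         if b not in enumeration_map_fwd:
--             enumeration_map_fwd[b] = node_counter
--             node_counter += 1
--
--         enumerated_edge_list.append((enumeration_map_fwd[a], enumeration_map_fwd[b]))
--
--     return enumerated_edge_list, node_counter
-- ===== SOURCE B (Python) =====
-- def merge_graphs(e1, e2):
--     # Flatten each list's node stream, dedup it keeping first occurrences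
--     # (dict.fromkeys), enumerate to get the id of every node, remap.
--     order1 = list(dict.fromkeys(x for ab in e1 for x in ab))
--     order2 = list(dict.fromkeys(x for ab in e2 for x in ab))
--     idx1 = {x: i for i, x in enumerate(order1)}
--     idx2 = {x: len(order1) + i for i, x in enumerate(order2)}
--     edges = [(idx1[a], idx1[b]) for a, b in e1] + [(idx2[a], idx2[b]) for a, b in e2]
--     return edges, len(order1) + len(order2)
-- ===== Notes on version B (the rewrite author's own statement) =====
-- stated objective: idiomatic
-- what changed: B replaces A's single interleaved loop threading a counter and appending edges with a pipeline: flatten each list's node stream, ordered-dedup it via dict.fromkeys, derive ids by enumerate (second block offset by len(order1)), then remap both edge lists through the finished index dicts and concatenate.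
import Mathlib
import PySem

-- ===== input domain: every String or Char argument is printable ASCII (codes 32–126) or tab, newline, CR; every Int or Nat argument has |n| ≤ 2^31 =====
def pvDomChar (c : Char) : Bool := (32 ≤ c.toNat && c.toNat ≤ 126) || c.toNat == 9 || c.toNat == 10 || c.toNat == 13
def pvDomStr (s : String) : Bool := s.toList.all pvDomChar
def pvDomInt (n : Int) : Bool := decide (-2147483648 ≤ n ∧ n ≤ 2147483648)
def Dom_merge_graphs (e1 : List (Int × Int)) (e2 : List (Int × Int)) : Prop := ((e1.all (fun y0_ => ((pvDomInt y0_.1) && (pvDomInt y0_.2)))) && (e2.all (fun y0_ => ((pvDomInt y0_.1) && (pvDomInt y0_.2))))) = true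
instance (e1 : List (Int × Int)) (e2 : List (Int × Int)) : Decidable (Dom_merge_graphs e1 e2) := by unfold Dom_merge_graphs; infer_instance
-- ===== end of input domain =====

-- B recasts A's interleaved counter-threading loop as a pipeline: flatten each list's
-- node stream, ordered-dedup it (dict.fromkeys), derive ids by enumerate, then remap
-- both lists through the finished index dicts (objective: idiomatic).

-- ===== PORT A =====
-- one iteration of A's loop body: state = (enumeration_map_fwd, node_counter, enumerated_edge_list)
def mgStepA (st : PySem.Dict Int Int × Int × List (Int × Int)) (e : Int × Int) :
    PySem.Dict Int Int × Int × List (Int × Int) :=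
  let d0 := st.1; let c0 := st.2.1; let acc := st.2.2
  let p1 := if d0.contains e.1 then (d0, c0) else (d0.insert e.1 c0, c0 + 1)
  let p2 := if p1.1.contains e.2 then p1 else (p1.1.insert e.2 p1.2, p1.2 + 1)
  -- map[a], map[b] are present here; getD with default 0 reads the stored value exactly
  (p2.1, p2.2, acc ++ [(p2.1.getD e.1 0, p2.1.getD e.2 0)])

def merge_graphs (e1 : List (Int × Int)) (e2 : List (Int × Int)) : (List (Int × Int)) × Int :=
  let st1 := e1.foldl mgStepA (PySem.Dict.empty, 0, [])
  -- enumeration_map_fwd is reset, node_counter and the edge list carry over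
  let st2 := e2.foldl mgStepA (PySem.Dict.empty, st1.2.1, st1.2.2)
  (st2.2.2, st2.2.1)

-- ===== PORT B =====
-- the flattened node stream 'x for ab in es for x in ab'
def mgFlat (es : List (Int × Int)) : List Int := es.flatMap (fun p => [p.1, p.2])

-- '{x: off + i for i, x in enumerate(ord)}'
def mgIdx (off : Int) (ord : List Int) : PySem.Dict Int Int :=
  (PySem.List.enumerate ord 0).foldl (fun d p => d.insert p.2 (off + p.1)) PySem.Dict.empty

def merge_graphs_alt (e1 : List (Int × Int)) (e2 : List (Int × Int)) : (List (Int × Int)) × Int :=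
  let order1 := PySem.List.dedup (mgFlat e1)
  let order2 := PySem.List.dedup (mgFlat e2)
  let idx1 := mgIdx 0 order1
  let idx2 := mgIdx (order1.length : Int) order2
  (e1.map (fun p => (idx1.getD p.1 0, idx1.getD p.2 0))
     ++ e2.map (fun p => (idx2.getD p.1 0, idx2.getD p.2 0)),
   (order1.length : Int) + (order2.length : Int))

-- ===== PRECONDITION & SPEC =====
def Spec_merge_graphs (e1 : List (Int × Int)) (e2 : List (Int × Int)) (out : (List (Int × Int)) × Int) : Prop := out = merge_graphs_alt e1 e2
instance (e1 : List (Int × Int)) (e2 : List (Int × Int)) (out : (List (Int × Int)) × Int) : Decidable (Spec_merge_graphs e1 e2 out) := by unfold Spec_merge_graphs; infer_instance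

-- ===== CLAIM =====
def Claim_equal_merge_graphs : Prop := ∀ (e1 : List (Int × Int)) (e2 : List (Int × Int)), Dom_merge_graphs e1 e2 → Spec_merge_graphs e1 e2 (merge_graphs e1 e2)

-- ===== LEMMAS AND PROOFS =====

theorem keys_mgIdx (off : Int) (s : List Int) (h : s.Nodup) : (mgIdx off s).keys = s := by
  unfold mgIdx
  rw [PySem.Dict.keys_foldl_insert_key]
  simp [PySem.List.map_snd_enumerate, PySem.Set.ofList_eq_self_of_nodup s h,
    PySem.Set.update_nil_left]

theorem contains_mgIdx (off : Int) (s : List Int) (h : s.Nodup) (k : Int) :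
    (mgIdx off s).contains k = decide (k ∈ s) := by
  rw [PySem.Dict.contains_eq_decide_mem_keys, keys_mgIdx off s h]

theorem items_mgIdx (off : Int) (s : List Int) (h : s.Nodup) :
    (mgIdx off s).items = (PySem.List.enumerate s 0).map (fun p => (p.2, off + p.1)) := by
  unfold mgIdx
  rw [PySem.Dict.items_foldl_insert_fresh _ _ _ _
    (fun a _ => PySem.Dict.contains_empty _)
    (by rw [PySem.List.map_snd_enumerate]; exact h)]
  rfl

theorem getD_mgIdx (off : Int) (s : List Int) (h : s.Nodup) (k : Int) (hk : k ∈ s) :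
    (mgIdx off s).getD k 0 = off + (s.idxOf k : Int) := by
  have hj : s.idxOf k < s.length := List.idxOf_lt_length_of_mem hk
  have hjm : ((0 + (s.idxOf k : Int), s[s.idxOf k]) : Int × Int) ∈ PySem.List.enumerate s 0 := by
    have := PySem.List.getElem_enumerate (xs := s) (s := 0) (k := s.idxOf k)
      (h := by simpa [PySem.List.length_enumerate] using hj)
    rw [← this]
    exact List.getElem_mem _
  have hmem : (k, off + (s.idxOf k : Int)) ∈ (mgIdx off s).items := by
    rw [items_mgIdx off s h]
    refine List.mem_map.mpr ⟨(0 + (s.idxOf k : Int), s[s.idxOf k]), hjm, ?_⟩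
    simp [List.getElem_idxOf hj]
  exact PySem.Dict.getD_of_mem_items _ hmem (by rw [keys_mgIdx off s h]; exact h) 0

theorem mgIdx_add (off : Int) (s : List Int) (h : s.Nodup) (x : Int) :
    mgIdx off (PySem.Set.add s x)
      = if x ∈ s then mgIdx off s else (mgIdx off s).insert x (off + (s.length : Int)) := by
  by_cases hx : x ∈ s
  · simp [hx]
  · have hsx : (s ++ [x]).Nodup := by
      simp [List.nodup_append, h]
      exact fun a ha hax => hx (hax ▸ ha)
    rw [PySem.Set.add_of_not_mem hx]
    simp only [hx, if_false]
    apply PySem.Dict.ext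
    rw [items_mgIdx off _ hsx,
      PySem.Dict.items_insert_of_not_contains _ _ (by rw [contains_mgIdx off s h]; simpa using hx),
      items_mgIdx off s h, PySem.List.enumerate_append]
    simp [PySem.List.enumerate]

-- length of the seen-set after one 'if x not in seen: id(x) = counter; counter += 1' step
theorem length_add (s : List Int) (x : Int) :
    ((PySem.Set.add s x).length : Int) = if x ∈ s then (s.length : Int) else (s.length : Int) + 1 := by
  by_cases hx : x ∈ s
  · simp [hx]
  · simp [hx]

-- once a node is in the seen-set its index never changes as the set grows
theorem idxOf_update (s : List Int) (xs : List Int) (k : Int) (hk : k ∈ s) :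
    (PySem.Set.update s xs).idxOf k = s.idxOf k := by
  rw [PySem.Set.update_eq_append_filter]
  exact List.idxOf_append_of_mem hk

theorem mem_add_left (s : List Int) (x k : Int) (hk : k ∈ s) : k ∈ PySem.Set.add s x :=
  (PySem.Set.mem_add _ _ _).mpr (Or.inl hk)

theorem mem_add_self (s : List Int) (x : Int) : x ∈ PySem.Set.add s x :=
  (PySem.Set.mem_add _ _ _).mpr (Or.inr rfl)

-- A's loop over es, started with the dict/counter corresponding to seen-set s,
-- computes the dict/counter of the grown seen-set and appends the remapped edges
theorem loopA (off : Int) (es : List (Int × Int)) :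
    ∀ (s : List Int) (acc : List (Int × Int)), s.Nodup →
    es.foldl mgStepA (mgIdx off s, off + (s.length : Int), acc)
      = (mgIdx off (PySem.Set.update s (mgFlat es)),
         off + (((PySem.Set.update s (mgFlat es)).length : Int)),
         acc ++ es.map (fun p =>
           (off + (((PySem.Set.update s (mgFlat es)).idxOf p.1 : Int)),
            off + (((PySem.Set.update s (mgFlat es)).idxOf p.2 : Int))))) := by
  induction es with
  | nil => intro s acc _; simp [mgFlat, PySem.Set.update_nil]
  | cons e es ih =>
    intro s acc hs
    have hflat : mgFlat (e :: es) = e.1 :: e.2 :: mgFlat es := by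
      simp [mgFlat]
    set s2 := PySem.Set.add (PySem.Set.add s e.1) e.2 with hs2
    have hs1n : (PySem.Set.add s e.1).Nodup := PySem.Set.nodup_add _ _ hs
    have hs2n : s2.Nodup := PySem.Set.nodup_add _ _ hs1n
    have hupd : PySem.Set.update s (mgFlat (e :: es)) = PySem.Set.update s2 (mgFlat es) := by
      rw [hflat, PySem.Set.update_cons, PySem.Set.update_cons]
    have he1 : e.1 ∈ s2 := mem_add_left _ _ _ (mem_add_self s e.1)
    have he2 : e.2 ∈ s2 := mem_add_self _ e.2
    have hstep : mgStepA (mgIdx off s, off + (s.length : Int), acc) e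
        = (mgIdx off s2, off + (s2.length : Int),
           acc ++ [(off + (s2.idxOf e.1 : Int), off + (s2.idxOf e.2 : Int))]) := by
      unfold mgStepA
      by_cases h1 : e.1 ∈ s
      · have hadd1 : PySem.Set.add s e.1 = s := PySem.Set.add_of_mem h1
        have hc1 : (mgIdx off s).contains e.1 = true := by
          rw [contains_mgIdx off s hs]; simp [h1]
        by_cases h2 : e.2 ∈ PySem.Set.add s e.1
        · have h2s : e.2 ∈ s := by rw [hadd1] at h2; exact h2
          have hB : s2 = s := by rw [hs2, PySem.Set.add_of_mem h2, hadd1]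
          have hc2 : (mgIdx off s).contains e.2 = true := by
            rw [contains_mgIdx off s hs]; simp [h2s]
          simp only [hc1, hc2, if_true]
          rw [getD_mgIdx off s hs e.1 h1, getD_mgIdx off s hs e.2 h2s, hB]
        · have h2s : e.2 ∉ s := by rw [hadd1] at h2; exact h2
          have hset : s2 = PySem.Set.add s e.2 := by rw [hs2, hadd1]
          have hc2 : (mgIdx off s).contains e.2 = false := by
            rw [contains_mgIdx off s hs]; simp [h2s]
          have hins : (mgIdx off s).insert e.2 (off + (s.length : Int)) = mgIdx off s2 := by
            rw [hset, mgIdx_add off s hs e.2, if_neg h2s]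
          have hlen : (s2.length : Int) = (s.length : Int) + 1 := by
            rw [hset, length_add, if_neg h2s]
          simp only [hc1, hc2, Bool.false_eq_true, if_false, if_true]
          rw [hins, getD_mgIdx off s2 hs2n e.1 he1, getD_mgIdx off s2 hs2n e.2 he2, hlen]
          simp only [Prod.mk.injEq]
          exact ⟨trivial, by ring, trivial⟩
      · have hc1 : (mgIdx off s).contains e.1 = false := by
          rw [contains_mgIdx off s hs]; simp [h1]
        have hins1 : (mgIdx off s).insert e.1 (off + (s.length : Int))
            = mgIdx off (PySem.Set.add s e.1) := by
          rw [mgIdx_add off s hs e.1, if_neg h1]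
        have hlen1 : ((PySem.Set.add s e.1).length : Int) = (s.length : Int) + 1 := by
          rw [length_add, if_neg h1]
        by_cases h2 : e.2 ∈ PySem.Set.add s e.1
        · have hB : s2 = PySem.Set.add s e.1 := by rw [hs2, PySem.Set.add_of_mem h2]
          have hc2 : (mgIdx off (PySem.Set.add s e.1)).contains e.2 = true := by
            rw [contains_mgIdx off _ hs1n]; simp [h2]
          simp only [hc1, Bool.false_eq_true, if_false, if_true]
          rw [hins1]
          simp only [hc2, Bool.false_eq_true, if_false, if_true]
          rw [getD_mgIdx off _ hs1n e.1 (hB ▸ he1), getD_mgIdx off _ hs1n e.2 (hB ▸ he2),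
            hB, hlen1]
          simp only [Prod.mk.injEq]
          exact ⟨trivial, by ring, trivial⟩
        · have hc2 : (mgIdx off (PySem.Set.add s e.1)).contains e.2 = false := by
            rw [contains_mgIdx off _ hs1n]; simp [h2]
          have hins2 : (mgIdx off (PySem.Set.add s e.1)).insert e.2 (off + (s.length : Int) + 1)
              = mgIdx off s2 := by
            rw [hs2, mgIdx_add off _ hs1n e.2, if_neg h2, hlen1]; ring_nf
          have hlen2 : (s2.length : Int) = (s.length : Int) + 1 + 1 := by
            rw [hs2, length_add, if_neg h2, hlen1]
          simp only [hc1, Bool.false_eq_true, if_false, if_true]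
          rw [hins1]
          simp only [hc2, Bool.false_eq_true, if_false, if_true]
          rw [hins2, getD_mgIdx off s2 hs2n e.1 he1, getD_mgIdx off s2 hs2n e.2 he2, hlen2]
          simp only [Prod.mk.injEq]
          exact ⟨trivial, by ring, trivial⟩
    rw [List.foldl_cons, hstep,
      show off + (s2.length : Int) = off + ((s2.length : Nat) : Int) from rfl]
    rw [ih s2 _ hs2n, hupd]
    simp [idxOf_update s2 (mgFlat es) e.1 he1, idxOf_update s2 (mgFlat es) e.2 he2]

-- ===== VERDICT (by name: the statement is the Claim_ definition above) =====
theorem merge_graphs_spec : Claim_equal_merge_graphs := by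
  intro e1 e2 _
  show merge_graphs e1 e2 = merge_graphs_alt e1 e2
  have hD1 : PySem.Set.update [] (mgFlat e1) = PySem.List.dedup (mgFlat e1) := by
    rw [PySem.Set.update_nil_left]; simp
  have hD2 : PySem.Set.update [] (mgFlat e2) = PySem.List.dedup (mgFlat e2) := by
    rw [PySem.Set.update_nil_left]; simp
  have hA1 := loopA 0 e1 [] [] List.nodup_nil
  rw [hD1] at hA1
  have hA2 := loopA ((PySem.List.dedup (mgFlat e1)).length : Int) e2 []
    (e1.map (fun p =>
      ((0 : Int) + ((PySem.List.dedup (mgFlat e1)).idxOf p.1 : Int),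
       (0 : Int) + ((PySem.List.dedup (mgFlat e1)).idxOf p.2 : Int)))) List.nodup_nil
  rw [hD2] at hA2
  have hst : ((PySem.Dict.empty : PySem.Dict Int Int), (0 : Int), ([] : List (Int × Int)))
      = (mgIdx 0 [], (0 : Int) + ((([] : List Int).length : Nat) : Int),
         ([] : List (Int × Int))) := by decide
  have hst2 : ∀ (c : Int) (l : List (Int × Int)),
      ((PySem.Dict.empty : PySem.Dict Int Int), c, l)
        = (mgIdx c [], c + ((([] : List Int).length : Nat) : Int), l) := by
    intro c l
    simp only [List.length_nil, Nat.cast_zero, add_zero]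
    rfl
  simp only [merge_graphs, merge_graphs_alt]
  rw [hst, hA1]
  simp only [List.nil_append]
  rw [show (0 : Int) + (((PySem.List.dedup (mgFlat e1)).length : Nat) : Int)
      = ((PySem.List.dedup (mgFlat e1)).length : Int) from by ring]
  rw [hst2, hA2]
  have hm1 : ∀ p ∈ e1, ((mgIdx 0 (PySem.List.dedup (mgFlat e1))).getD p.1 0,
        (mgIdx 0 (PySem.List.dedup (mgFlat e1))).getD p.2 0)
      = ((0 : Int) + ((PySem.List.dedup (mgFlat e1)).idxOf p.1 : Int),
         (0 : Int) + ((PySem.List.dedup (mgFlat e1)).idxOf p.2 : Int)) := by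
    intro p hp
    have hn : (PySem.List.dedup (mgFlat e1)).Nodup := by
      simp only [PySem.List.dedup_eq_ofList]; exact PySem.Set.nodup_ofList _
    have hp1 : p.1 ∈ PySem.List.dedup (mgFlat e1) := by
      simp only [PySem.List.dedup_eq_ofList, PySem.Set.mem_ofList, mgFlat]
      exact List.mem_flatMap.mpr ⟨p, hp, by simp⟩
    have hp2 : p.2 ∈ PySem.List.dedup (mgFlat e1) := by
      simp only [PySem.List.dedup_eq_ofList, PySem.Set.mem_ofList, mgFlat]
      exact List.mem_flatMap.mpr ⟨p, hp, by simp⟩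
    rw [getD_mgIdx _ _ hn _ hp1, getD_mgIdx _ _ hn _ hp2]
  have hm2 : ∀ p ∈ e2, ((mgIdx ((PySem.List.dedup (mgFlat e1)).length : Int)
          (PySem.List.dedup (mgFlat e2))).getD p.1 0,
        (mgIdx ((PySem.List.dedup (mgFlat e1)).length : Int)
          (PySem.List.dedup (mgFlat e2))).getD p.2 0)
      = (((PySem.List.dedup (mgFlat e1)).length : Int)
            + ((PySem.List.dedup (mgFlat e2)).idxOf p.1 : Int),
         ((PySem.List.dedup (mgFlat e1)).length : Int)
            + ((PySem.List.dedup (mgFlat e2)).idxOf p.2 : Int)) := by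
    intro p hp
    have hn : (PySem.List.dedup (mgFlat e2)).Nodup := by
      simp only [PySem.List.dedup_eq_ofList]; exact PySem.Set.nodup_ofList _
    have hp1 : p.1 ∈ PySem.List.dedup (mgFlat e2) := by
      simp only [PySem.List.dedup_eq_ofList, PySem.Set.mem_ofList, mgFlat]
      exact List.mem_flatMap.mpr ⟨p, hp, by simp⟩
    have hp2 : p.2 ∈ PySem.List.dedup (mgFlat e2) := by
      simp only [PySem.List.dedup_eq_ofList, PySem.Set.mem_ofList, mgFlat]
      exact List.mem_flatMap.mpr ⟨p, hp, by simp⟩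
    rw [getD_mgIdx _ _ hn _ hp1, getD_mgIdx _ _ hn _ hp2]
  simp only [List.map_congr_left hm1, List.map_congr_left hm2]
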